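-- pv_equiv track=rewrite | github.com/19521790/XLNNTN | SoSanh.py | split_compare_sentences
-- ===== SOURCE A (Python) =====
-- def split_compare_sentences(_sen):
--     array = []
--     cur_pos = 0
--     i = 0
--     while i < len(_sen):
--         if _sen[i] == " ":
--             array.append(_sen[cur_pos: i])
--             cur_pos = i
--         elif _sen[i] == "_":
--             array.append(_sen[cur_pos: i])
--             cur_pos = i
--         i += 1
--     array.append(_sen[cur_pos:])
--     return array
-- ===== SOURCE B (Python) =====
-- import re
--
-- def split_compare_sentences(_sen):
--     # Split immediately BEFORE each space/underscore (zero-width lookahead),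
--     # so each delimiter stays attached as the first char of the next segment.
--     return re.split(r'(?=[ _])', _sen)
-- ===== Notes on version B (the rewrite author's own statement) =====
-- stated objective: idiomatic
-- what changed: Replaces the manual index/slice while-loop with a single regex split on a zero-width lookahead before each space/underscore, delegating the traversal to the regex engine.
import Mathlib
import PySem

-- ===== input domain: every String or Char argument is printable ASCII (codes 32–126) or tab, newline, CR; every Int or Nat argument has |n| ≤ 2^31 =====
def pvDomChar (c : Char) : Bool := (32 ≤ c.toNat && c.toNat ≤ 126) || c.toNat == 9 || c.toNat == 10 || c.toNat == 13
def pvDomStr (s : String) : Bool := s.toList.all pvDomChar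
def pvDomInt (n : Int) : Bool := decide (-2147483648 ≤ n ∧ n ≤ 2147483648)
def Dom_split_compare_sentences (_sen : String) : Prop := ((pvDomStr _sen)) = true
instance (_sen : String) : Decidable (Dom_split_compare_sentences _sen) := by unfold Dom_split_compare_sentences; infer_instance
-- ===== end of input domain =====

-- B replaces A's manual index/slice while-loop with a regex split before each
-- space/underscore (idiomatic delegation to the regex engine; POC ported as a
-- structural recursion on the character list).

-- ===== PORT A =====
-- The while-loop: i scans the string, cur_pos marks the start of the pending
-- segment, segments are slices _sen[cur_pos:i]; final append of _sen[cur_pos:].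
def splitLoopA (cs : List Char) (i cur : Nat) (array : List (List Char)) :
    List (List Char) :=
  if h : i < cs.length then
    if cs[i] = ' ' then
      splitLoopA cs (i + 1) i
        (array ++ [PySem.List.slice cs (some (cur : Int)) (some (i : Int))])
    else if cs[i] = '_' then
      splitLoopA cs (i + 1) i
        (array ++ [PySem.List.slice cs (some (cur : Int)) (some (i : Int))])
    else
      splitLoopA cs (i + 1) cur array
  else
    array ++ [PySem.List.slice cs (some (cur : Int)) none]
termination_by cs.length - i

def split_compare_sentences (_sen : String) : List String :=
  (splitLoopA _sen.toList 0 0 []).map String.ofList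

-- ===== PORT B =====
-- Hand port of re.split(r'(?=[ _])', s): exact regex-split semantics — the
-- string is cut at the zero-width position before every ' ' or '_', so each
-- delimiter begins the following segment; the result is always nonempty
-- (a lone trailing empty segment for the empty string).
def reSplitBefore (cs : List Char) : List (List Char) :=
  match cs with
  | [] => [[]]
  | c :: rest =>
      match reSplitBefore rest with
      | [] => [[c]]  -- unreachable: reSplitBefore never returns []
      | h :: t =>
          if c == ' ' || c == '_' then [] :: (c :: h) :: t
          else (c :: h) :: t

def split_compare_sentences_alt (_sen : String) : List String :=
  (reSplitBefore _sen.toList).map String.ofList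

-- ===== PRECONDITION & SPEC =====
def Spec_split_compare_sentences (_sen : String) (out : List String) : Prop := out = split_compare_sentences_alt _sen
instance (_sen : String) (out : List String) : Decidable (Spec_split_compare_sentences _sen out) := by unfold Spec_split_compare_sentences; infer_instance

-- ===== CLAIM (what is proved, stated in full; the proofs are below) =====
def Claim_equal_split_compare_sentences : Prop := ∀ (_sen : String), Dom_split_compare_sentences _sen → Spec_split_compare_sentences _sen (split_compare_sentences _sen)

-- ===== LEMMAS AND PROOFS =====

lemma reSplitBefore_ne_nil (cs : List Char) : reSplitBefore cs ≠ [] := by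
  cases cs with
  | nil => simp [reSplitBefore]
  | cons c rest =>
      unfold reSplitBefore
      cases reSplitBefore rest with
      | nil => simp
      | cons h t => by_cases hd : (c == ' ' || c == '_') = true <;> simp [hd]

-- prepend a prefix to the first segment
def attachHead (p : List Char) : List (List Char) → List (List Char)
  | [] => [p]
  | h :: t => (p ++ h) :: t

lemma slice_succ (cs : List Char) (cur i : Nat) (hc : cur ≤ i)
    (hi : i < cs.length) :
    PySem.List.slice cs (some (cur : Int)) (some ((i + 1 : Nat) : Int)) =
      PySem.List.slice cs (some (cur : Int)) (some (i : Int)) ++ [cs[i]] := by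
  rw [PySem.List.slice_natCast, PySem.List.slice_natCast]
  have hdrop : i - cur < (cs.drop cur).length := by
    simp [List.length_drop]; omega
  rw [show i + 1 - cur = (i - cur) + 1 by omega,
      List.take_add_one, List.getElem?_eq_getElem hdrop]
  simp [List.getElem_drop, show cur + (i - cur) = i by omega]

lemma splitLoopA_eq (cs : List Char) :
    ∀ i cur array, cur ≤ i → i ≤ cs.length →
    splitLoopA cs i cur array =
      array ++ attachHead (PySem.List.slice cs (some (cur : Int)) (some (i : Int)))
        (reSplitBefore (cs.drop i)) := by
  intro i
  induction hn : cs.length - i using Nat.strong_induction_on generalizing i with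
  | _ n ih =>
  intro cur array hcur hi
  by_cases h : i < cs.length
  · have hdrop : cs.drop i = cs[i] :: cs.drop (i + 1) :=
      List.drop_eq_getElem_cons h
    have ihstep : ∀ cur' array', cur' ≤ i + 1 →
        splitLoopA cs (i + 1) cur' array' =
          array' ++ attachHead
            (PySem.List.slice cs (some (cur' : Int)) (some ((i + 1 : Nat) : Int)))
            (reSplitBefore (cs.drop (i + 1))) := by
      intro cur' array' hc'
      exact ih (cs.length - (i + 1)) (by omega) (i + 1) rfl cur' array' hc' (by omega)
    obtain ⟨hh, t, hrest⟩ : ∃ hh t, reSplitBefore (cs.drop (i + 1)) = hh :: t := by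
      cases hr : reSplitBefore (cs.drop (i + 1)) with
      | nil => exact absurd hr (reSplitBefore_ne_nil _)
      | cons hh t => exact ⟨hh, t, rfl⟩
    rw [splitLoopA]
    simp only [h, dif_pos]
    by_cases hsp : cs[i] = ' '
    · rw [if_pos hsp, ihstep i _ (by omega), hdrop, reSplitBefore, hrest]
      rw [slice_succ cs i i le_rfl h]
      simp [attachHead, hsp, PySem.List.slice_natCast]
    · by_cases hus : cs[i] = '_'
      · rw [if_neg hsp, if_pos hus, ihstep i _ (by omega), hdrop,
            reSplitBefore, hrest]
        rw [slice_succ cs i i le_rfl h]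
        simp [attachHead, hus, PySem.List.slice_natCast]
      · rw [if_neg hsp, if_neg hus, ihstep cur _ (by omega), hdrop,
            reSplitBefore, hrest]
        rw [slice_succ cs cur i hcur h]
        have hdelim : (cs[i] == ' ' || cs[i] == '_') = false := by
          simp [hsp, hus]
        simp [attachHead, hdelim]
  · have hlen : i = cs.length := by omega
    rw [splitLoopA]
    simp only [h]
    subst hlen
    simp [attachHead, reSplitBefore, PySem.List.slice_natCast,
          PySem.List.slice_from_natCast, List.take_of_length_le]

-- ===== VERDICT (by name: the statement is the Claim_ definition above) =====
theorem split_compare_sentences_spec : Claim_equal_split_compare_sentences := by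
  intro s _
  unfold Spec_split_compare_sentences split_compare_sentences split_compare_sentences_alt
  rw [splitLoopA_eq s.toList 0 0 [] le_rfl (by omega), PySem.List.slice_natCast]
  obtain ⟨hh, t, hr⟩ : ∃ hh t, reSplitBefore s.toList = hh :: t := by
    cases hr : reSplitBefore s.toList with
    | nil => exact absurd hr (reSplitBefore_ne_nil _)
    | cons hh t => exact ⟨hh, t, rfl⟩
  simp [hr, attachHead]
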